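-- pv_equiv track=rewrite | github.com/merttoka/SimAesthetics-LoRA | scripts/make_grid.py | best_grid_layout
-- ===== SOURCE A (Python) =====
-- import math
--
-- def best_grid_layout(n: int, max_cols: int = 8) -> tuple[int, int]:
--     """Find cols x rows where cols >= rows (landscape orientation).
--
--     Each pair is 2 cells tall (sim + AI stacked), so we optimize for
--     a wide layout. Always prefer more columns than rows.
--     """
--     if n <= max_cols:
--         return n, 1
--     best = (max_cols, math.ceil(n / max_cols))
--     for cols in range(max_cols, 1, -1):
--         rows = math.ceil(n / cols)
--         if cols >= rows:
--             return cols, rows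
--     return best
-- ===== SOURCE B (Python) =====
-- import math
--
-- def best_grid_layout(n: int, max_cols: int = 8) -> tuple[int, int]:
--     """Closed form: the loop in A can only succeed on its first iteration
--     (decreasing cols only increases ceil(n/cols)), and its fallback is the
--     same pair, so after the guard the answer is always
--     (max_cols, ceil(n / max_cols))."""
--     if n <= max_cols:
--         return n, 1
--     return max_cols, -(-n // max_cols)
-- ===== Notes on version B (the rewrite author's own statement) =====
-- stated objective: simpler
-- what changed: The descending search loop is removed entirely: since ceil(n/cols) grows as cols shrinks, the cols>=rows test can only succeed on the first iteration and the fallback equals that same pair, so B returns the closed form (max_cols, ceil(n/max_cols)) directly, using integer ceiling division.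
import Mathlib
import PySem

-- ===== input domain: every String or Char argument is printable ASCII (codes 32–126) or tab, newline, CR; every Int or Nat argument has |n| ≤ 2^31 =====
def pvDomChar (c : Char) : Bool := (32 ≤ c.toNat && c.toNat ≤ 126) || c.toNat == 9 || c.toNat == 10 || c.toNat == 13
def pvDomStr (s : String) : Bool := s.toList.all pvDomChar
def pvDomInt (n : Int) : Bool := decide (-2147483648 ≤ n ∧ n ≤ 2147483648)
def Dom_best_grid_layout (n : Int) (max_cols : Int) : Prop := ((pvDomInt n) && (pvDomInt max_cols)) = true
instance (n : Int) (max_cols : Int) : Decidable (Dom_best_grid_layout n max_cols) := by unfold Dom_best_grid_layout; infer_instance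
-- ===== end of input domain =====

-- B removes A's descending loop: after the guard the answer is always the closed form
-- (max_cols, ceil(n / max_cols)); objective: simpler.
-- math.ceil(n / cols) is ported as exact integer ceiling division -((-n) // cols);
-- this is exact on Dom (|n| ≤ 2^31 keeps the float quotient from crossing an integer).

-- ===== PORT A =====
-- ceiling division: math.ceil(n / c) (exact integers on Dom)
def pvCeilDiv (n c : Int) : Int := -(PySem.Int.floordiv (-n) c)

-- the 'for cols in range(max_cols, 1, -1)' loop with early return, fallback = best
def bglLoop (n : Int) (best : Int × Int) : List Int → Int × Int
  | [] => best
  | c :: rest =>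
    let rows := pvCeilDiv n c
    if rows ≤ c then (c, rows) else bglLoop n best rest

def best_grid_layout (n : Int) (max_cols : Int) : Int × Int :=
  if n ≤ max_cols then (n, 1)
  else
    let best := (max_cols, pvCeilDiv n max_cols)
    bglLoop n best (PySem.List.pyRange max_cols 1 (-1))

-- ===== PORT B =====
def best_grid_layout_alt (n : Int) (max_cols : Int) : Int × Int :=
  if n ≤ max_cols then (n, 1)
  else (max_cols, -(PySem.Int.floordiv (-n) max_cols))

-- ===== PRECONDITION & SPEC =====
-- Pre_ excludes exactly max_cols = 0 with n > max_cols, where both A and B raise ZeroDivisionError.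
def Pre_best_grid_layout (n : Int) (max_cols : Int) : Prop := max_cols ≠ 0 ∨ n ≤ max_cols
instance (n : Int) (max_cols : Int) : Decidable (Pre_best_grid_layout n max_cols) := by
  unfold Pre_best_grid_layout; infer_instance

def pvWitness_best_grid_layout : Int × Int := (17, 8)

def Spec_best_grid_layout (n : Int) (max_cols : Int) (out : Int × Int) : Prop := out = best_grid_layout_alt n max_cols
instance (n : Int) (max_cols : Int) (out : Int × Int) : Decidable (Spec_best_grid_layout n max_cols out) := by unfold Spec_best_grid_layout; infer_instance

-- ===== CLAIM (what is proved, stated in full; the proofs are below) =====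
def Claim_equal_best_grid_layout : Prop := ∀ (n : Int) (max_cols : Int), Dom_best_grid_layout n max_cols → Pre_best_grid_layout n max_cols → Spec_best_grid_layout n max_cols (best_grid_layout n max_cols)

-- ===== LEMMAS AND PROOFS =====

-- ceil(n/c) ≤ q ↔ n ≤ q*c, for 0 < c
theorem pvCeilDiv_le_iff {n c q : Int} (hc : 0 < c) : pvCeilDiv n c ≤ q ↔ n ≤ q * c := by
  unfold pvCeilDiv
  rw [neg_le, PySem.Int.le_floordiv_iff_mul_le hc]
  constructor <;> intro h <;> nlinarith

-- if the test fails on every element, the loop returns the fallback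
theorem bglLoop_all_fail (n : Int) (best : Int × Int) (l : List Int)
    (h : ∀ c ∈ l, ¬ pvCeilDiv n c ≤ c) : bglLoop n best l = best := by
  induction l with
  | nil => rfl
  | cons c rest ih =>
    simp only [bglLoop]
    rw [if_neg (h c (List.mem_cons_self))]
    exact ih fun x hx => h x (List.mem_cons_of_mem _ hx)

-- the loop always returns (max_cols, ceil(n/max_cols))
theorem bglLoop_closed (n m : Int) :
    bglLoop n (m, pvCeilDiv n m) (PySem.List.pyRange m 1 (-1)) = (m, pvCeilDiv n m) := by
  rcases le_or_gt m 1 with h1 | h1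
  · rw [PySem.List.pyRange_neg_one_eq_nil h1]; rfl
  · rw [PySem.List.pyRange_neg_one_cons h1]
    simp only [bglLoop]
    by_cases hfirst : pvCeilDiv n m ≤ m
    · rw [if_pos hfirst]
    · rw [if_neg hfirst]
      apply bglLoop_all_fail
      intro c hc
      rw [PySem.List.mem_pyRange_neg_one] at hc
      have hcpos : 0 < c := by omega
      rw [pvCeilDiv_le_iff hcpos]
      rw [pvCeilDiv_le_iff (by omega : (0:Int) < m)] at hfirst
      push Not at hfirst ⊢
      nlinarith

-- ===== VERDICT (by name: the statement is the Claim_ definition above) =====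
theorem best_grid_layout_spec : Claim_equal_best_grid_layout := by
  intro n m _ hpre
  unfold Spec_best_grid_layout best_grid_layout best_grid_layout_alt
  by_cases h : n ≤ m
  · rw [if_pos h, if_pos h]
  · rw [if_neg h, if_neg h]
    simpa [pvCeilDiv] using bglLoop_closed n m
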